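-- pv_equiv track=rewrite | github.com/Sabbirbracu/CSE220-BRACU | Lab_02/task4.py | calculate_knight_moves
-- ===== SOURCE A (Python) =====
-- def calculate_knight_moves(knight):
--     chessboard = [[0] * 8 for _ in range(8)]
--
--     movements = [
--         (2, 1), (2, -1), (-2, 1), (-2, -1),
--         (1, 2), (1, -2), (-1, 2), (-1, -2)
--     ]
--
--     x, y = knight
--
--     for dx, dy in movements:
--         new_x = x + dx
--         new_y = y + dy
--
--         if 0 <= new_x < 8 and 0 <= new_y < 8:
--             chessboard[new_x][new_y] = 3
--
--     chessboard[x][y] = 33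
--
--     return chessboard
-- ===== SOURCE B (Python) =====
-- def calculate_knight_moves(knight):
--     x, y = knight
--     chessboard = [[0] * 8 for _ in range(8)]
--     for nx in range(8):
--         for ny in range(8):
--             if (abs(nx - x), abs(ny - y)) in ((1, 2), (2, 1)):
--                 chessboard[nx][ny] = 3
--     chessboard[x][y] = 33
--     return chessboard
-- ===== Notes on version B (the rewrite author's own statement) =====
-- stated objective: alternative
-- what changed: Replaces A's enumerate-the-eight-knight-offsets-and-bounds-check strategy with a scan of all 64 board cells marking each cell whose absolute coordinate differences from the knight are one and two in either order; the final 33 marking is the same assignment, and Pre_ excludes only the inputs where that assignment raises IndexError in both programs.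
import Mathlib
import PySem

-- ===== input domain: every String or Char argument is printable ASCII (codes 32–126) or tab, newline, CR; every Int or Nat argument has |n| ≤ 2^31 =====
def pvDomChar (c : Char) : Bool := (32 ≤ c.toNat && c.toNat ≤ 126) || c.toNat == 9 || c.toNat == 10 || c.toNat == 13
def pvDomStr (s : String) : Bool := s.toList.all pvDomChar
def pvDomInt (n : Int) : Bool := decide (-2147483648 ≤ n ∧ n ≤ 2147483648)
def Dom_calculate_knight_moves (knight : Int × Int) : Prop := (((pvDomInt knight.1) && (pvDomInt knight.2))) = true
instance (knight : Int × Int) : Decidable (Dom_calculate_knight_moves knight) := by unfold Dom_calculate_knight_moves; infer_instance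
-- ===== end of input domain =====

-- B replaces A's enumerate-8-offsets-and-bounds-check marking with a scan of all 64 board
-- cells testing the knight-distance predicate; objective: alternative decomposition.

-- chessboard[i][j] = v  (Python semantics via pyGetD/pySetD: negative index wraps; exact
-- under Pre_, which keeps both indices in range)
def pvSetCell (b : List (List Int)) (i j v : Int) : List (List Int) :=
  PySem.List.pySetD b i (PySem.List.pySetD (PySem.List.pyGetD b i []) j v)

-- exact port of Python's built-in abs on int
def pvAbs (n : Int) : Int := if n < 0 then -n else n

-- ===== PORT A =====
def calculate_knight_moves (knight : Int × Int) : List (List Int) :=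
  let chessboard : List (List Int) := List.replicate 8 (List.replicate 8 0)
  let movements : List (Int × Int) :=
    [(2, 1), (2, -1), (-2, 1), (-2, -1), (1, 2), (1, -2), (-1, 2), (-1, -2)]
  let x := knight.1
  let y := knight.2
  let chessboard := movements.foldl (fun b d =>
    let new_x := x + d.1
    let new_y := y + d.2
    if 0 ≤ new_x ∧ new_x < 8 ∧ 0 ≤ new_y ∧ new_y < 8 then
      pvSetCell b new_x new_y 3
    else b) chessboard
  pvSetCell chessboard x y 33

-- ===== PORT B =====
def calculate_knight_moves_alt (knight : Int × Int) : List (List Int) :=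
  let x := knight.1
  let y := knight.2
  let chessboard : List (List Int) := List.replicate 8 (List.replicate 8 0)
  let chessboard := (PySem.List.pyRange 0 8 1).foldl (fun b nx =>
    (PySem.List.pyRange 0 8 1).foldl (fun b ny =>
      if (pvAbs (nx - x), pvAbs (ny - y)) = ((1 : Int), (2 : Int)) ∨
         (pvAbs (nx - x), pvAbs (ny - y)) = ((2 : Int), (1 : Int)) then
        pvSetCell b nx ny 3
      else b) b) chessboard
  pvSetCell chessboard x y 33

-- ===== PRECONDITION & SPEC =====
-- Pre_ excludes exactly the inputs on which the final assignment chessboard[x][y] = 33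
-- raises IndexError in both A and B (a coordinate outside [-8, 8)).
def Pre_calculate_knight_moves (knight : Int × Int) : Prop :=
  -8 ≤ knight.1 ∧ knight.1 < 8 ∧ -8 ≤ knight.2 ∧ knight.2 < 8
instance (knight : Int × Int) : Decidable (Pre_calculate_knight_moves knight) := by
  unfold Pre_calculate_knight_moves; infer_instance

def pvWitness_calculate_knight_moves : (Int × Int) := (3, 4)

def Spec_calculate_knight_moves (knight : Int × Int) (out : List (List Int)) : Prop :=
  out = calculate_knight_moves_alt knight
instance (knight : Int × Int) (out : List (List Int)) : Decidable (Spec_calculate_knight_moves knight out) := by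
  unfold Spec_calculate_knight_moves; infer_instance

-- ===== CLAIM (what is proved, stated in full; the proofs are below) =====
def Claim_equal_calculate_knight_moves : Prop := ∀ (knight : Int × Int), Dom_calculate_knight_moves knight → Pre_calculate_knight_moves knight → Spec_calculate_knight_moves knight (calculate_knight_moves knight)

-- ===== LEMMAS AND PROOFS =====
-- exhaustive check of the 16 × 16 admitted knight positions
set_option maxRecDepth 8000 in
theorem pv_key : ∀ x ∈ PySem.List.pyRange (-8) 8 1, ∀ y ∈ PySem.List.pyRange (-8) 8 1,
    calculate_knight_moves (x, y) = calculate_knight_moves_alt (x, y) := by decide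

-- ===== VERDICT (by name: the statement is the Claim_ definition above) =====
theorem calculate_knight_moves_spec : Claim_equal_calculate_knight_moves := by
  unfold Claim_equal_calculate_knight_moves
  rintro ⟨x, y⟩ _ ⟨h1, h2, h3, h4⟩
  exact pv_key x (PySem.List.mem_pyRange_one.mpr ⟨h1, h2⟩)
    y (PySem.List.mem_pyRange_one.mpr ⟨h3, h4⟩)
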